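-- pv_equiv track=rewrite | github.com/gthgomez/MonteCarlo-Ledger | main.py | calculate_forecast_summary
-- ===== SOURCE A (Python) =====
-- from typing import Optional, Any, List, Dict
--
-- def calculate_forecast_summary(balance_cents: int, forecast_rows: List[Dict]) -> Dict:
--     """
--     Computes summary metrics for a generated forecast.
--     """
--     lowest_balance = balance_cents
--     lowest_balance_date = None
--     first_negative_date = None
--     ending_balance = balance_cents
--
--     for row in forecast_rows:
--         cur_bal = row['balance_after']
--         ending_balance = cur_bal
--
--         if cur_bal < lowest_balance:
--             lowest_balance = cur_bal
--             lowest_balance_date = row['date']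
--
--         if first_negative_date is None and cur_bal < 0:
--             first_negative_date = row['date']
--
--     return {
--         "starting_balance": balance_cents,
--         "lowest_balance": lowest_balance,
--         "lowest_balance_date": lowest_balance_date,
--         "ending_balance": ending_balance,
--         "first_negative_date": first_negative_date
--     }
-- ===== SOURCE B (Python) =====
-- from typing import Optional, Any, List, Dict
--
-- def calculate_forecast_summary(balance_cents: int, forecast_rows: List[Dict]) -> Dict:
--     ending_balance = forecast_rows[-1]['balance_after'] if forecast_rows else balance_cents
--     first_negative_date = next((r['date'] for r in forecast_rows if r['balance_after'] < 0), None)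
--     m = min((r['balance_after'] for r in forecast_rows), default=balance_cents)
--     if m < balance_cents:
--         lowest_balance = m
--         lowest_balance_date = next((r['date'] for r in forecast_rows if r['balance_after'] == m), None)
--     else:
--         lowest_balance = balance_cents
--         lowest_balance_date = None
--     return {
--         "starting_balance": balance_cents,
--         "lowest_balance": lowest_balance,
--         "lowest_balance_date": lowest_balance_date,
--         "ending_balance": ending_balance,
--         "first_negative_date": first_negative_date
--     }
-- ===== Notes on version B (the rewrite author's own statement) =====
-- stated objective: alternative
-- what changed: Replaces A's single stateful loop (running minimum, four mutable variables) with three independent computations: ending balance from the last row, first-negative date via one scan, and lowest balance/date from the global minimum plus a first-occurrence scan; Pre_ excludes only inputs where A raises KeyError (a row missing 'balance_after', or missing 'date' on a row where A reads it).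
import Mathlib
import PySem

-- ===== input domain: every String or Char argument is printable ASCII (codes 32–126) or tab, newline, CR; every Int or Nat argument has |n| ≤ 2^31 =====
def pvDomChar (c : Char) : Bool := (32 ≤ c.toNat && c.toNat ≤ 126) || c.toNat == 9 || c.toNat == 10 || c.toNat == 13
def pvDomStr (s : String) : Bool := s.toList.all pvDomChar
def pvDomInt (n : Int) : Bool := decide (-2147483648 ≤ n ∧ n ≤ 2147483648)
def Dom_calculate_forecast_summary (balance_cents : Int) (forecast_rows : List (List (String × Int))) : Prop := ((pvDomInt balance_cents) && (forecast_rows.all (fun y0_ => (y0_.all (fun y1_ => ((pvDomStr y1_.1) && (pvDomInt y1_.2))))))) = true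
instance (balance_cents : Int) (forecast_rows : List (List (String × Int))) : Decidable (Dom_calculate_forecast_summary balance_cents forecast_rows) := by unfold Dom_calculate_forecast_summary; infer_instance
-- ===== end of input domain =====

-- B replaces A's single stateful loop with three independent scans (last row, first-negative scan,
-- global minimum + first-occurrence scan); same O(n) cost, different decomposition.


-- ===== PORT A =====
-- row['balance_after'] / row['date'] : first-match association-list lookup; Pre_ guarantees the key
-- is present, so .getD 0 is never taken on admitted inputs (Python raises KeyError there).
def pvBal (r : List (String × Int)) : Int := (r.lookup "balance_after").getD 0
def pvDate (r : List (String × Int)) : Int := (r.lookup "date").getD 0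

-- one iteration of A's for-loop over state (lowest_balance, lowest_balance_date, first_negative_date, ending_balance)
def pvStepA (s : Int × Option Int × Option Int × Int) (r : List (String × Int)) :
    Int × Option Int × Option Int × Int :=
  let cur := pvBal r
  ( if cur < s.1 then cur else s.1,
    if cur < s.1 then some (pvDate r) else s.2.1,
    if s.2.2.1 = none ∧ cur < 0 then some (pvDate r) else s.2.2.1,
    cur )

def calculate_forecast_summary (balance_cents : Int) (forecast_rows : List (List (String × Int))) : List (String × Option Int) :=
  let st := forecast_rows.foldl pvStepA (balance_cents, none, none, balance_cents)
  [("starting_balance", some balance_cents),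
   ("lowest_balance", some st.1),
   ("lowest_balance_date", st.2.1),
   ("ending_balance", some st.2.2.2),
   ("first_negative_date", st.2.2.1)]

-- ===== PORT B =====
def calculate_forecast_summary_alt (balance_cents : Int) (forecast_rows : List (List (String × Int))) : List (String × Option Int) :=
  -- forecast_rows[-1]['balance_after'] if forecast_rows else balance_cents
  let ending : Int := match forecast_rows.getLast? with
    | some r => pvBal r
    | none => balance_cents
  -- next((r['date'] for r in forecast_rows if r['balance_after'] < 0), None)
  let firstNeg : Option Int := (forecast_rows.find? (fun r => decide (pvBal r < 0))).map pvDate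
  -- min((r['balance_after'] for r in forecast_rows), default=balance_cents)
  let m : Int := match PySem.List.min? (forecast_rows.map pvBal) (fun x => x) with
    | some v => v
    | none => balance_cents
  let low : Int := if m < balance_cents then m else balance_cents
  let lowDate : Option Int :=
    if m < balance_cents then (forecast_rows.find? (fun r => pvBal r == m)).map pvDate else none
  [("starting_balance", some balance_cents),
   ("lowest_balance", some low),
   ("lowest_balance_date", lowDate),
   ("ending_balance", some ending),
   ("first_negative_date", firstNeg)]

-- ===== PRECONDITION & SPEC =====
-- Pre_ is exactly the set of inputs on which Python A returns (no KeyError): every row carries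
-- 'balance_after', and a row carries 'date' whenever A reads it — i.e. when its balance is a
-- strict new running minimum (below balance_cents and below every earlier balance) or it is the
-- first negative row.
def Pre_calculate_forecast_summary (balance_cents : Int) (forecast_rows : List (List (String × Int))) : Prop :=
  ∀ i < forecast_rows.length,
    ((forecast_rows.getD i []).lookup "balance_after").isSome ∧
    (((pvBal (forecast_rows.getD i []) < balance_cents ∧
        ∀ j < i, pvBal (forecast_rows.getD i []) < pvBal (forecast_rows.getD j [])) ∨
      (pvBal (forecast_rows.getD i []) < 0 ∧
        ∀ j < i, 0 ≤ pvBal (forecast_rows.getD j []))) →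
      ((forecast_rows.getD i []).lookup "date").isSome)
instance (balance_cents : Int) (forecast_rows : List (List (String × Int))) : Decidable (Pre_calculate_forecast_summary balance_cents forecast_rows) := by unfold Pre_calculate_forecast_summary; infer_instance
def pvWitness_calculate_forecast_summary : Int × (List (List (String × Int))) :=
  (100, [[("date", 1), ("balance_after", -5)], [("date", 2), ("balance_after", 3)]])

def Spec_calculate_forecast_summary (balance_cents : Int) (forecast_rows : List (List (String × Int))) (out : List (String × Option Int)) : Prop := out = calculate_forecast_summary_alt balance_cents forecast_rows
instance (balance_cents : Int) (forecast_rows : List (List (String × Int))) (out : List (String × Option Int)) : Decidable (Spec_calculate_forecast_summary balance_cents forecast_rows out) := by unfold Spec_calculate_forecast_summary; infer_instance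

-- ===== CLAIM (what is proved, stated in full; the proofs are below) =====
def Claim_equal_calculate_forecast_summary : Prop := ∀ (balance_cents : Int) (forecast_rows : List (List (String × Int))), Dom_calculate_forecast_summary balance_cents forecast_rows → Pre_calculate_forecast_summary balance_cents forecast_rows → Spec_calculate_forecast_summary balance_cents forecast_rows (calculate_forecast_summary balance_cents forecast_rows)

-- ===== LEMMAS AND PROOFS =====

lemma foldl_min_min (t : List Int) (a : Int) : ∀ b, t.foldl min (min a b) = min a (t.foldl min b) := by
  induction t with
  | nil => intro b; rfl
  | cons c t ih =>
    intro b
    simp only [List.foldl_cons, min_assoc]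
    exact ih (min b c)

-- A's loop, fully characterised: running-minimum, date of first attainment of the global minimum,
-- date of first negative row, and last balance.
lemma loopA_spec (rows : List (List (String × Int))) :
    ∀ (low : Int) (ld fn : Option Int) (e : Int),
    rows.foldl pvStepA (low, ld, fn, e) =
      ( (rows.map pvBal).foldl min low,
        (if (rows.map pvBal).foldl min low < low then
            (rows.find? (fun r => pvBal r == (rows.map pvBal).foldl min low)).map pvDate
         else ld),
        (match fn with
          | some x => some x
          | none => (rows.find? (fun r => decide (pvBal r < 0))).map pvDate),
        (match rows.getLast? with | some r => pvBal r | none => e) ) := by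
  induction rows with
  | nil =>
    intro low ld fn e
    simp only [List.foldl_nil, List.map_nil, List.find?_nil, List.getLast?_nil]
    cases fn <;> simp
  | cons r t ih =>
    intro low ld fn e
    rw [List.foldl_cons]
    simp only [pvStepA]
    rw [ih]
    have hfold : ((r :: t).map pvBal).foldl min low = (t.map pvBal).foldl min (min low (pvBal r)) := by
      simp [List.foldl_cons]
    have hMtle : (t.map pvBal).foldl min (pvBal r) ≤ pvBal r :=
      (PySem.List.foldl_min_le (t.map pvBal) (pvBal r)).1
    refine Prod.ext ?_ (Prod.ext ?_ (Prod.ext ?_ ?_))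
    · -- lowest balance
      dsimp only
      rw [hfold]
      by_cases h : pvBal r < low
      · simp only [if_pos h, min_eq_right (le_of_lt h)]
      · simp only [if_neg h, min_eq_left (not_lt.mp h)]
    · -- lowest balance date
      dsimp only
      rw [hfold]
      by_cases h : pvBal r < low
      · simp only [if_pos h, min_eq_right (le_of_lt h)]
        have hMlt : (t.map pvBal).foldl min (pvBal r) < low := lt_of_le_of_lt hMtle h
        simp only [if_pos hMlt, List.find?_cons]
        by_cases h2 : (t.map pvBal).foldl min (pvBal r) < pvBal r
        · have hb : (pvBal r == (t.map pvBal).foldl min (pvBal r)) = false := by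
            simp; omega
          simp only [hb, if_pos h2]
        · have heq : (t.map pvBal).foldl min (pvBal r) = pvBal r :=
            le_antisymm hMtle (not_lt.mp h2)
          have hb : (pvBal r == (t.map pvBal).foldl min (pvBal r)) = true := by simp [heq]
          simp only [hb, if_neg h2]
          simp
      · simp only [if_neg h, min_eq_left (not_lt.mp h)]
        by_cases h2 : (t.map pvBal).foldl min low < low
        · simp only [if_pos h2, List.find?_cons]
          have hb : (pvBal r == (t.map pvBal).foldl min low) = false := by
            simp
            have := not_lt.mp h
            omega
          simp only [hb]
        · simp only [if_neg h2]
    · -- first negative date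
      dsimp only
      cases fn with
      | some x => simp
      | none =>
        by_cases h : pvBal r < 0
        · simp [h]
        · have hb : (decide (pvBal r < 0)) = false := by simp; omega
          simp [h]
    · -- ending balance
      dsimp only
      cases t with
      | nil => simp
      | cons r2 t2 =>
        rcases h3 : (r2 :: t2).getLast? with _ | x
        · simp at h3
        · rw [List.getLast?_cons_cons, h3]

-- relate A's total running minimum to B's 'min with default'
lemma min_default_eq (bc : Int) (rows : List (List (String × Int))) :
    (rows.map pvBal).foldl min bc =
      min bc (match PySem.List.min? (rows.map pvBal) (fun x => x) with
               | some v => v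
               | none => bc) := by
  cases rows with
  | nil =>
    have h0 : PySem.List.min? ([] : List Int) (fun x => x) = none := by
      rw [PySem.List.min?_eq_none_iff]
    simp [h0]
  | cons r t =>
    simp only [List.map_cons, PySem.List.min?_id_cons, List.foldl_cons]
    exact foldl_min_min (t.map pvBal) bc (pvBal r)

-- ===== VERDICT (by name: the statement is the Claim_ definition above) =====
theorem calculate_forecast_summary_spec : Claim_equal_calculate_forecast_summary := by
  intro bc rows _hdom _hpre
  unfold Spec_calculate_forecast_summary calculate_forecast_summary calculate_forecast_summary_alt
  rw [loopA_spec rows bc none none bc]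
  set m : Int := (match PySem.List.min? (rows.map pvBal) (fun x => x) with
                   | some v => v
                   | none => bc) with hm
  have hM : (rows.map pvBal).foldl min bc = min bc m := by
    rw [min_default_eq bc rows, hm]
  simp only [hM]
  by_cases h : m < bc
  · have h1 : min bc m = m := min_eq_right (le_of_lt h)
    simp [h1, h]
  · have h1 : min bc m = bc := min_eq_left (not_lt.mp h)
    simp [h1, h]
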